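-- pv_equiv track=rewrite | github.com/matthewvu2719/Journey | backend/ml/recommendation_engine.py | _has_similar_habit
-- ===== SOURCE A (Python) =====
-- from typing import Dict, List, Any, Optional
--
-- def _has_similar_habit(template: Dict[str, Any], habits: List[Dict[str, Any]]) -> bool:
--     """Check if user already has a similar habit"""
--     template_name_lower = template['name'].lower()
--
--     for habit in habits:
--         habit_name_lower = habit.get('name', '').lower()
--
--         # Check for keyword overlap
--         template_words = set(template_name_lower.split())
--         habit_words = set(habit_name_lower.split())
--
--         if len(template_words & habit_words) >= 1:
--             return True
--
--     return False
-- ===== SOURCE B (Python) =====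
-- def _has_similar_habit(template, habits):
--     """Check if user already has a similar habit (aggregate-then-single-check)."""
--     tmpl = set(template['name'].lower().split())
--     all_words = set()
--     for habit in habits:
--         all_words.update(habit.get('name', '').lower().split())
--     return bool(tmpl & all_words)
-- ===== Notes on version B (the rewrite author's own statement) =====
-- stated objective: alternative
-- what changed: Instead of intersecting the template word set with each habit's word set inside the loop with an early return, B accumulates the union of all habit-name words into one set and performs a single intersection with the template word set at the end.
import Mathlib
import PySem

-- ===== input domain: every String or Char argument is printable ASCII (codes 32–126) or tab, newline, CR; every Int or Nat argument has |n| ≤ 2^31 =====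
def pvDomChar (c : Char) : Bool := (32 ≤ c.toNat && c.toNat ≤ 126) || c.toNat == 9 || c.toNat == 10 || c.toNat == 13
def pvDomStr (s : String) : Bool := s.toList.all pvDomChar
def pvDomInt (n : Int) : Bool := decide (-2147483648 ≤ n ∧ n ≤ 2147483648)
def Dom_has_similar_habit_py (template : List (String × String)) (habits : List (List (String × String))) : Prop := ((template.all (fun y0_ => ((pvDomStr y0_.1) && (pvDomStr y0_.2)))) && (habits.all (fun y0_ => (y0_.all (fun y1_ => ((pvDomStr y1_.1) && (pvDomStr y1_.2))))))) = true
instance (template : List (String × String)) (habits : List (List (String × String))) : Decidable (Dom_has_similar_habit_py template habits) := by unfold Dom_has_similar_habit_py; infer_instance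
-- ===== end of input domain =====

-- B replaces A's per-habit intersection with early return by accumulating the union of all
-- habit-name words into one set and doing a single intersection at the end (alternative decomposition).

-- first-match association-list lookup: Python dict access d[k] / d.get(k, default)
def pvLookup? : List (String × String) → String → Option String
  | [], _ => none
  | (k, v) :: rest, key => if k == key then some v else pvLookup? rest key

-- ===== PORT A =====
-- the 'for habit in habits' loop with early return
def pvALoop (tnl : String) : List (List (String × String)) → Bool
  | [] => false
  | habit :: rest =>
    let hnl := PySem.Str.lower ((pvLookup? habit "name").getD "")
    let tw := PySem.Set.ofList (PySem.Str.split₀ tnl)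
    let hw := PySem.Set.ofList (PySem.Str.split₀ hnl)
    if 1 ≤ PySem.Set.len (PySem.Set.inter tw hw) then true
    else pvALoop tnl rest

def has_similar_habit_py (template : List (String × String)) (habits : List (List (String × String))) : Bool :=
  let tnl := PySem.Str.lower ((pvLookup? template "name").getD "")
  pvALoop tnl habits

-- ===== PORT B =====
def has_similar_habit_py_alt (template : List (String × String)) (habits : List (List (String × String))) : Bool :=
  let tmpl := PySem.Set.ofList (PySem.Str.split₀ (PySem.Str.lower ((pvLookup? template "name").getD "")))
  let allWords := habits.foldl
    (fun acc habit => PySem.Set.update acc (PySem.Str.split₀ (PySem.Str.lower ((pvLookup? habit "name").getD ""))))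
    PySem.Set.empty
  !(PySem.Set.isdisjoint tmpl allWords)

-- ===== PRECONDITION & SPEC =====
-- Pre_ excludes only inputs where template has no "name" key: Python A raises KeyError there.
def Pre_has_similar_habit_py (template : List (String × String)) (habits : List (List (String × String))) : Prop :=
  (pvLookup? template "name").isSome = true
instance (template : List (String × String)) (habits : List (List (String × String))) : Decidable (Pre_has_similar_habit_py template habits) := by unfold Pre_has_similar_habit_py; infer_instance

def pvWitness_has_similar_habit_py : (List (String × String)) × (List (List (String × String))) :=
  ([("name", "Run Daily")], [[("name", "run fast")]])

def Spec_has_similar_habit_py (template : List (String × String)) (habits : List (List (String × String))) (out : Bool) : Prop := out = has_similar_habit_py_alt template habits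
instance (template : List (String × String)) (habits : List (List (String × String))) (out : Bool) : Decidable (Spec_has_similar_habit_py template habits out) := by unfold Spec_has_similar_habit_py; infer_instance

-- ===== CLAIM (what is proved, stated in full; the proofs are below) =====
def Claim_equal_has_similar_habit_py : Prop := ∀ (template : List (String × String)) (habits : List (List (String × String))), Dom_has_similar_habit_py template habits → Pre_has_similar_habit_py template habits → Spec_has_similar_habit_py template habits (has_similar_habit_py template habits)

-- ===== LEMMAS AND PROOFS =====

-- the words of a dict's lowered name, as both ports compute them
def pvHabitWords (habit : List (String × String)) : List String :=
  PySem.Str.split₀ (PySem.Str.lower ((pvLookup? habit "name").getD ""))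

theorem pvHabitWords_eq (habit : List (String × String)) :
    PySem.Str.split₀ (PySem.Str.lower ((pvLookup? habit "name").getD "")) = pvHabitWords habit := rfl

theorem pv_contains_iff {t : PySem.Set String} {x : String} :
    PySem.Set.contains t x = true ↔ x ∈ t := by
  simp [PySem.Set.contains]

theorem pvALoop_true_iff (tnl : String) (habits : List (List (String × String))) :
    pvALoop tnl habits = true ↔
      ∃ h ∈ habits, ∃ w, w ∈ PySem.Str.split₀ tnl ∧ w ∈ pvHabitWords h := by
  induction habits with
  | nil => simp [pvALoop]
  | cons habit rest ih =>
    simp only [pvALoop, pvHabitWords_eq]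
    by_cases hcase : 1 ≤ PySem.Set.len (PySem.Set.inter (PySem.Set.ofList (PySem.Str.split₀ tnl))
        (PySem.Set.ofList (pvHabitWords habit)))
    · rw [if_pos hcase]
      refine ⟨fun _ => ?_, fun _ => rfl⟩
      have hne : PySem.Set.inter (PySem.Set.ofList (PySem.Str.split₀ tnl))
          (PySem.Set.ofList (pvHabitWords habit)) ≠ [] := by
        intro hnil
        simp [PySem.Set.len, hnil] at hcase
      obtain ⟨w, hw⟩ := List.exists_mem_of_ne_nil _ hne
      rw [PySem.Set.mem_inter, PySem.Set.mem_ofList, PySem.Set.mem_ofList] at hw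
      exact ⟨habit, by simp, w, hw.1, hw.2⟩
    · rw [if_neg hcase, ih]
      constructor
      · rintro ⟨h, hh, w, hw1, hw2⟩
        exact ⟨h, List.mem_cons_of_mem _ hh, w, hw1, hw2⟩
      · rintro ⟨h, hh, w, hw1, hw2⟩
        rcases List.mem_cons.mp hh with rfl | hmem
        · exfalso
          apply hcase
          have hmemI : w ∈ PySem.Set.inter (PySem.Set.ofList (PySem.Str.split₀ tnl))
              (PySem.Set.ofList (pvHabitWords h)) := by
            rw [PySem.Set.mem_inter, PySem.Set.mem_ofList, PySem.Set.mem_ofList]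
            exact ⟨hw1, hw2⟩
          have hpos := List.length_pos_of_mem hmemI
          simp only [PySem.Set.len]
          omega
        · exact ⟨h, hmem, w, hw1, hw2⟩

theorem pv_mem_foldl_update (habits : List (List (String × String)))
    (acc : PySem.Set String) (x : String) :
    (x ∈ habits.foldl (fun a h => PySem.Set.update a (pvHabitWords h)) acc) ↔
      x ∈ acc ∨ ∃ h ∈ habits, x ∈ pvHabitWords h := by
  induction habits generalizing acc with
  | nil => simp
  | cons habit rest ih =>
    simp only [List.foldl_cons, ih, PySem.Set.mem_update]
    constructor
    · rintro (⟨hx | hx⟩ | ⟨h, hh, hx⟩)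
      · exact Or.inl hx
      · exact Or.inr ⟨habit, by simp, hx⟩
      · exact Or.inr ⟨h, List.mem_cons_of_mem _ hh, hx⟩
    · rintro (hx | ⟨h, hh, hx⟩)
      · exact Or.inl (Or.inl hx)
      · rcases List.mem_cons.mp hh with rfl | hmem
        · exact Or.inl (Or.inr hx)
        · exact Or.inr ⟨h, hmem, hx⟩

theorem pv_alt_true_iff (template : List (String × String)) (habits : List (List (String × String))) :
    has_similar_habit_py_alt template habits = true ↔
      ∃ w, w ∈ pvHabitWords template ∧ ∃ h ∈ habits, w ∈ pvHabitWords h := by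
  unfold has_similar_habit_py_alt
  simp only [pvHabitWords_eq, PySem.Set.isdisjoint, Bool.not_not, List.any_eq_true]
  constructor
  · rintro ⟨w, hw1, hw2⟩
    refine ⟨w, (PySem.Set.mem_ofList _ _).mp hw1, ?_⟩
    have hw2' : w ∈ habits.foldl (fun acc h => PySem.Set.update acc (pvHabitWords h)) PySem.Set.empty :=
      pv_contains_iff.mp hw2
    rcases (pv_mem_foldl_update habits PySem.Set.empty w).mp hw2' with he | hgood
    · exact absurd he (by simp [PySem.Set.empty])
    · exact hgood
  · rintro ⟨w, hw1, h, hh, hw2⟩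
    refine ⟨w, (PySem.Set.mem_ofList _ _).mpr hw1, ?_⟩
    exact pv_contains_iff.mpr
      ((pv_mem_foldl_update habits PySem.Set.empty w).mpr (Or.inr ⟨h, hh, hw2⟩))

-- ===== VERDICT (by name: the statement is the Claim_ definition above) =====
theorem has_similar_habit_py_spec : Claim_equal_has_similar_habit_py := by
  intro template habits _ _
  unfold Spec_has_similar_habit_py has_similar_habit_py
  show pvALoop (PySem.Str.lower ((pvLookup? template "name").getD "")) habits =
    has_similar_habit_py_alt template habits
  cases hA : pvALoop (PySem.Str.lower ((pvLookup? template "name").getD "")) habits with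
  | false =>
    symm
    rw [Bool.eq_false_iff]
    intro hB
    rcases (pv_alt_true_iff template habits).mp hB with ⟨w, hw1, h, hh, hw2⟩
    have htrue : pvALoop (PySem.Str.lower ((pvLookup? template "name").getD "")) habits = true :=
      (pvALoop_true_iff _ _).mpr ⟨h, hh, w, hw1, hw2⟩
    rw [hA] at htrue
    exact Bool.false_ne_true htrue
  | true =>
    symm
    rcases (pvALoop_true_iff _ _).mp hA with ⟨h, hh, w, hw1, hw2⟩
    exact (pv_alt_true_iff template habits).mpr ⟨w, hw1, h, hh, hw2⟩
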